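-- pv_equiv track=rewrite | github.com/ThomasTrepanier/log6307-final-project | data/interim/stackoverflow/src/python/8_118.py | evaluateActionIndex
-- ===== SOURCE A (Python) =====
-- import itertools #Generates all permutations
--
-- def evaluateActionIndex(varList):
--     allcombinations = itertools.product([False, True], repeat=len(varList))
--     i = 0
--     for subset in allcombinations: #for each of the possible combinations...
--         if list(subset) == varList: #Check to see if we want to execute this index.
--             return i
--         i = i + 1                  #Increment the target index
--     return -1                      #Execute default method (-1 index)
-- ===== SOURCE B (Python) =====
-- def evaluateActionIndex(varList):
--     # The index of varList in the product enumeration is just its value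
--     # read as a binary number (False=0, True=1, most significant bit first).
--     i = 0
--     for b in varList:
--         i = 2 * i + (1 if b else 0)
--     return i
-- ===== Notes on version B (the rewrite author's own statement) =====
-- stated objective: faster
-- what changed: Replaces the O(n*2^n) scan over all itertools.product combinations with a single left-to-right pass reading the boolean list as a binary number (the index equals its binary value).
import Mathlib
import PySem

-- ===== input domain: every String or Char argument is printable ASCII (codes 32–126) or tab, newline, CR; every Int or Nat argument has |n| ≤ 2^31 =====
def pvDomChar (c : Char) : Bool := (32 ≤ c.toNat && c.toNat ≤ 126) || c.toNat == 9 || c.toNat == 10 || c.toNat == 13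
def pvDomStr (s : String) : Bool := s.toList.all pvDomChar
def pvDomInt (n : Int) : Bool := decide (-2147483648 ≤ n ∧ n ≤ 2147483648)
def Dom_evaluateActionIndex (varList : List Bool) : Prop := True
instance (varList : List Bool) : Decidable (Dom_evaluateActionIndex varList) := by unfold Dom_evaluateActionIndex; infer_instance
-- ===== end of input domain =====

-- B replaces A's linear scan over all 2^n product tuples by a single pass
-- reading the list as a binary number (objective: faster, asymptotically).

-- ===== PORT A =====
-- itertools.product([False, True], repeat=n): all n-tuples in lexicographic
-- order, first coordinate varying slowest.
def pvCombos : Nat → List (List Bool)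
  | 0 => [[]]
  | n + 1 => ([false, true]).flatMap (fun b => (pvCombos n).map (b :: ·))

-- the 'for subset in allcombinations' loop with counter i
def pvLoopA (varList : List Bool) : List (List Bool) → Int → Int
  | [], _ => -1
  | s :: rest, i => if s = varList then i else pvLoopA varList rest (i + 1)

def evaluateActionIndex (varList : List Bool) : Int :=
  pvLoopA varList (pvCombos varList.length) 0

-- ===== PORT B =====
def evaluateActionIndex_alt (varList : List Bool) : Int :=
  varList.foldl (fun i b => 2 * i + (if b then 1 else 0)) 0

-- ===== PRECONDITION & SPEC =====
def Spec_evaluateActionIndex (varList : List Bool) (out : Int) : Prop := out = evaluateActionIndex_alt varList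
instance (varList : List Bool) (out : Int) : Decidable (Spec_evaluateActionIndex varList out) := by unfold Spec_evaluateActionIndex; infer_instance

-- ===== CLAIM (what is proved, stated in full; the proofs are below) =====
def Claim_equal_evaluateActionIndex : Prop := ∀ (varList : List Bool), Dom_evaluateActionIndex varList → Spec_evaluateActionIndex varList (evaluateActionIndex varList)

-- ===== LEMMAS AND PROOFS =====

theorem pvCombos_length (n : Nat) : (pvCombos n).length = 2 ^ n := by
  induction n with
  | zero => rfl
  | succ n ih => simp [pvCombos, List.flatMap, ih]; ring

theorem mem_pvCombos (l : List Bool) : l ∈ pvCombos l.length := by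
  induction l with
  | nil => simp [pvCombos]
  | cons b t ih =>
    simp [pvCombos]
    cases b with
    | false => exact Or.inl ⟨ih, rfl⟩
    | true => exact Or.inr ⟨ih, rfl⟩

theorem pvLoopA_append_mem (tgt : List Bool) (xs ys : List (List Bool)) (i : Int)
    (h : tgt ∈ xs) : pvLoopA tgt (xs ++ ys) i = pvLoopA tgt xs i := by
  induction xs generalizing i with
  | nil => simp at h
  | cons x xs ih =>
    simp only [List.cons_append, pvLoopA]
    split
    · rfl
    · rcases List.mem_cons.mp h with h1 | h2
      · simp_all
      · exact ih _ h2

theorem pvLoopA_append_not_mem (tgt : List Bool) (xs ys : List (List Bool)) (i : Int)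
    (h : tgt ∉ xs) : pvLoopA tgt (xs ++ ys) i = pvLoopA tgt ys (i + xs.length) := by
  induction xs generalizing i with
  | nil => simp
  | cons x xs ih =>
    simp only [List.cons_append, pvLoopA]
    rw [if_neg (by rintro rfl; exact h (List.mem_cons_self))]
    rw [ih _ (fun hm => h (List.mem_cons_of_mem _ hm))]
    simp only [List.length_cons]
    push_cast
    ring

theorem pvLoopA_map_cons (b : Bool) (t : List Bool) (C : List (List Bool)) (i : Int) :
    pvLoopA (b :: t) (C.map (b :: ·)) i = pvLoopA t C i := by
  induction C generalizing i with
  | nil => rfl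
  | cons x xs ih => simp [pvLoopA, ih]

-- B's accumulator pass, with an arbitrary starting accumulator
theorem pvFoldl_shift (t : List Bool) (a : Int) :
    t.foldl (fun i b => 2 * i + (if b then 1 else 0)) a
      = a * 2 ^ t.length + t.foldl (fun i b => 2 * i + (if b then 1 else 0)) 0 := by
  induction t generalizing a with
  | nil => simp
  | cons b t ih =>
    simp only [List.foldl_cons, List.length_cons]
    rw [ih (2 * a + _), ih (2 * 0 + _)]
    push_cast
    ring

theorem pvMain (l : List Bool) (i : Int) :
    pvLoopA l (pvCombos l.length) i = i + evaluateActionIndex_alt l := by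
  induction l generalizing i with
  | nil => simp [pvCombos, pvLoopA, evaluateActionIndex_alt]
  | cons b t ih =>
    have hflat : pvCombos (b :: t).length
        = (pvCombos t.length).map (false :: ·) ++ (pvCombos t.length).map (true :: ·) := by
      simp [pvCombos, List.flatMap]
    rw [hflat]
    cases b with
    | false =>
      rw [pvLoopA_append_mem _ _ _ _ (List.mem_map_of_mem (mem_pvCombos t)),
        pvLoopA_map_cons, ih]
      simp [evaluateActionIndex_alt]
    | true =>
      have hnot : (true :: t) ∉ (pvCombos t.length).map (false :: ·) := by
        simp [List.mem_map]
      rw [pvLoopA_append_not_mem _ _ _ _ hnot, pvLoopA_map_cons, ih]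
      simp only [evaluateActionIndex_alt, List.foldl_cons, List.length_map, pvCombos_length,
        if_true]
      norm_num
      rw [pvFoldl_shift t 1]
      push_cast
      ring

-- ===== VERDICT (by name: the statement is the Claim_ definition above) =====
theorem evaluateActionIndex_spec : Claim_equal_evaluateActionIndex := by
  intro l _
  unfold Spec_evaluateActionIndex evaluateActionIndex
  rw [pvMain]
  ring
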